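-- pv_equiv track=rewrite | github.com/lukovnikov/parseq | parseq/scripts_insert/overnight_seqinsert.py | make_numbered_tokens
-- ===== SOURCE A (Python) =====
-- from typing import Dict, List
--
-- def make_numbered_tokens(x:List[str]):
--     counts = {}
--     y = []
--     for xe in x:
--         if xe not in counts:
--             counts[xe] = 0
--         counts[xe] += 1
--         y.append(f"{xe}::{counts[xe]}")
--     return y
-- ===== SOURCE B (Python) =====
-- from typing import Dict, List
--
-- def make_numbered_tokens(x: List[str]):
--     return [f"{xe}::{x[:i+1].count(xe)}" for i, xe in enumerate(x)]
-- ===== Notes on version B (the rewrite author's own statement) =====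
-- stated objective: simpler
-- what changed: B replaces the counts dict and accumulator loop with a one-line comprehension that numbers each token by counting its occurrences in the inclusive prefix x[:i+1].
import Mathlib
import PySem

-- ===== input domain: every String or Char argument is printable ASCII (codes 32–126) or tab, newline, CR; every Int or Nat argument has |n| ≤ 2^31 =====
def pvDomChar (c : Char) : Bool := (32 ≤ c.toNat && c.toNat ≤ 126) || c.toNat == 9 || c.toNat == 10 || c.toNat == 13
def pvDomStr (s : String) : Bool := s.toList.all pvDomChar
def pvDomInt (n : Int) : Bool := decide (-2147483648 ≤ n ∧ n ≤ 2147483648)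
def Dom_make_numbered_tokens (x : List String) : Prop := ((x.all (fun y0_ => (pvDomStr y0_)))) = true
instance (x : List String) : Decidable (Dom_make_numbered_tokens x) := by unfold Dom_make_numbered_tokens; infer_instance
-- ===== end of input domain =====

-- B numbers each token by counting its occurrences in the inclusive prefix x[:i+1]
-- (a one-line comprehension) instead of maintaining a running counts dict; same outputs.

-- ===== PORT A =====
def make_numbered_tokens (x : List String) : List String :=
  (x.foldl
    (fun (st : PySem.Dict String Int × List String) xe =>
      let counts := if st.1.contains xe = false then st.1.insert xe 0 else st.1
      let counts := counts.modify xe 0 (· + 1)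
      (counts, st.2 ++ [xe ++ "::" ++ PySem.Int.toStr (counts.getD xe 0)]))
    (PySem.Dict.empty, [])).2

-- ===== PORT B =====
def make_numbered_tokens_alt (x : List String) : List String :=
  (PySem.List.enumerate x).map
    (fun p => p.2 ++ "::" ++ PySem.Int.toStr ((PySem.List.slice x none (some (p.1 + 1))).count p.2))

-- ===== PRECONDITION & SPEC =====
def Spec_make_numbered_tokens (x : List String) (out : List String) : Prop := out = make_numbered_tokens_alt x
instance (x : List String) (out : List String) : Decidable (Spec_make_numbered_tokens x out) := by unfold Spec_make_numbered_tokens; infer_instance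

-- ===== CLAIM (what is proved, stated in full; the proofs are below) =====
def Claim_equal_make_numbered_tokens : Prop := ∀ (x : List String), Dom_make_numbered_tokens x → Spec_make_numbered_tokens x (make_numbered_tokens x)

-- ===== LEMMAS AND PROOFS =====

-- the common reference: number the tokens of l given an already-seen prefix acc
def pvRef (acc l : List String) : List String :=
  match l with
  | [] => []
  | xe :: rest => (xe ++ "::" ++ PySem.Int.toStr ((acc.count xe : Int) + 1)) :: pvRef (acc ++ [xe]) rest

-- A's loop step, named for the lemmas
def pvStepA (st : PySem.Dict String Int × List String) (xe : String) :
    PySem.Dict String Int × List String :=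
  let counts := if st.1.contains xe = false then st.1.insert xe 0 else st.1
  let counts := counts.modify xe 0 (· + 1)
  (counts, st.2 ++ [xe ++ "::" ++ PySem.Int.toStr (counts.getD xe 0)])

lemma pvStepA_getD (d : PySem.Dict String Int) (y : List String) (xe s : String) :
    ((pvStepA (d, y) xe).1).getD s 0 = d.getD s 0 + (if s = xe then 1 else 0) := by
  simp only [pvStepA]
  rw [PySem.Dict.getD_modify]
  by_cases h : s = xe
  · subst h
    simp only [if_pos trivial]
    by_cases hc : d.contains s = false
    · rw [if_pos hc, PySem.Dict.getD_insert,
        PySem.Dict.getD_of_not_contains d 0 hc]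
      norm_num
    · rw [if_neg hc]
  · simp only [if_neg h]
    by_cases hc : d.contains xe = false
    · rw [if_pos hc, PySem.Dict.getD_insert, if_neg h]; ring
    · rw [if_neg hc]; ring

lemma pvStepA_snd (d : PySem.Dict String Int) (y : List String) (xe : String) (acc : List String)
    (hinv : ∀ s, d.getD s 0 = (acc.count s : Int)) :
    (pvStepA (d, y) xe).2 = y ++ [xe ++ "::" ++ PySem.Int.toStr ((acc.count xe : Int) + 1)] := by
  have h := pvStepA_getD d y xe xe
  simp only [if_pos trivial] at h
  simp only [pvStepA] at h ⊢
  rw [h, hinv]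

lemma pvFoldA (l : List String) (d : PySem.Dict String Int) (y acc : List String)
    (hinv : ∀ s, d.getD s 0 = (acc.count s : Int)) :
    (l.foldl pvStepA (d, y)).2 = y ++ pvRef acc l := by
  induction l generalizing d y acc with
  | nil => simp [pvRef]
  | cons xe rest ih =>
    simp only [List.foldl_cons, pvRef]
    have hstep := pvStepA_snd d y xe acc hinv
    have hinv' : ∀ s, ((pvStepA (d, y) xe).1).getD s 0 = ((acc ++ [xe]).count s : Int) := by
      intro s
      rw [pvStepA_getD d y xe s, hinv s, List.count_append, List.count_singleton]
      by_cases h : s = xe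
      · simp [h]
      · simp [h, Ne.symm h]
    have := ih (pvStepA (d, y) xe).1 (pvStepA (d, y) xe).2 (acc ++ [xe]) hinv'
    rw [(by exact rfl : pvStepA (d, y) xe = ((pvStepA (d, y) xe).1, (pvStepA (d, y) xe).2))] at this ⊢
    rw [this, hstep, List.append_assoc]
    rfl

lemma pvA_eq_fold (x : List String) :
    make_numbered_tokens x = (x.foldl pvStepA (PySem.Dict.empty, [])).2 := rfl

lemma pvA_eq_ref (x : List String) : make_numbered_tokens x = pvRef [] x := by
  rw [pvA_eq_fold,
    pvFoldA x PySem.Dict.empty [] [] (by intro s; simp [PySem.Dict.getD_empty])]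
  rfl

lemma pvB_eq_ref (l acc : List String) :
    (PySem.List.enumerate l (acc.length : Int)).map
      (fun p => p.2 ++ "::" ++ PySem.Int.toStr ((PySem.List.slice (acc ++ l) none (some (p.1 + 1))).count p.2))
    = pvRef acc l := by
  induction l generalizing acc with
  | nil => simp [PySem.List.enumerate_nil, pvRef]
  | cons xe rest ih =>
    rw [PySem.List.enumerate_cons, List.map_cons, pvRef]
    congr 1
    · have hcast : ((acc.length : Int) + 1) = ((acc.length + 1 : Nat) : Int) := by push_cast; ring
      rw [hcast, PySem.List.slice_to_natCast]
      have htake : (acc ++ xe :: rest).take (acc.length + 1) = acc ++ [xe] := by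
        simp [List.take_append]
      rw [htake]
      simp [List.count_append]
    · have hlen : (acc.length : Int) + 1 = (((acc ++ [xe]).length : Nat) : Int) := by
        simp
      have hlist : acc ++ xe :: rest = (acc ++ [xe]) ++ rest := by simp
      rw [hlen, hlist]
      exact ih (acc ++ [xe])

lemma pvB_eq_ref0 (x : List String) : make_numbered_tokens_alt x = pvRef [] x := by
  have h := pvB_eq_ref x []
  simpa [make_numbered_tokens_alt, PySem.List.enumerate] using h

-- ===== VERDICT (by name: the statement is the Claim_ definition above) =====
theorem make_numbered_tokens_spec : Claim_equal_make_numbered_tokens := by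
  intro x _
  unfold Spec_make_numbered_tokens
  rw [pvA_eq_ref, pvB_eq_ref0]
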